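-- pv_equiv track=rewrite | github.com/arjn2/hookguard | hookguard.py | contains_urgent_language
-- ===== SOURCE A (Python) =====
-- def contains_urgent_language(email_body, subject):
--     urgent_phrases = [
--         "act now", "limited time", "important", "hurry", "quickly", "soon",
--         "serious legal action", "respond within 24 hours", "immediate action required",
--         "urgent", "failure to respond", "important notice", "last warning"
--     ]
--
--     body_contains_urgent = any(phrase in email_body.lower() for phrase in urgent_phrases)
--
--     if isinstance(subject, list):
--         subject_str = ' '.join(subject)  # Convert list to string
--         subject_contains_urgent = any(phrase in subject_str.lower() for phrase in urgent_phrases)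
--     else:
--         subject_contains_urgent = any(phrase in subject.lower() for phrase in urgent_phrases)
--
--     return body_contains_urgent or subject_contains_urgent
-- ===== SOURCE B (Python) =====
-- def contains_urgent_language(email_body, subject):
--     urgent_phrases = (
--         "act now", "limited time", "important", "hurry", "quickly", "soon",
--         "serious legal action", "respond within 24 hours", "immediate action required",
--         "urgent", "failure to respond", "important notice", "last warning"
--     )
--
--     def has_urgent(text):
--         t = text.lower()
--         # single position-major scan: at each offset, does any phrase start here?
--         return any(t.startswith(urgent_phrases, i) for i in range(len(t) + 1))
--
--     body_hit = has_urgent(email_body)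
--     if isinstance(subject, list):
--         subject = ' '.join(subject)
--     return body_hit or has_urgent(subject)
-- ===== Notes on version B (the rewrite author's own statement) =====
-- stated objective: alternative
-- what changed: A runs a separate substring search over the lowered text for each of the 13 phrases; B lowers the text once and makes a single position-major scan, asking at each offset whether any phrase starts there via str.startswith with the tuple of phrases.
import Mathlib
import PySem

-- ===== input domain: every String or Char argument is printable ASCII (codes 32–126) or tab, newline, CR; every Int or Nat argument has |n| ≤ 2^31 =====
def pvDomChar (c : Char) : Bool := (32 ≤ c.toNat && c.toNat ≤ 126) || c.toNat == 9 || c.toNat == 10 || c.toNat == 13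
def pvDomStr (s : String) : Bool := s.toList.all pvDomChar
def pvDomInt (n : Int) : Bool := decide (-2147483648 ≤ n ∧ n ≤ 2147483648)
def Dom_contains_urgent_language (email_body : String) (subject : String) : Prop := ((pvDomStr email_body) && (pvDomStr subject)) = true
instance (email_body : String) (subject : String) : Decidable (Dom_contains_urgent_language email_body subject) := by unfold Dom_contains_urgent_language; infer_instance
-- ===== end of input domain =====

-- B replaces A's phrase-major loop of substring searches by one position-major scan
-- that asks at each offset whether any phrase starts there (alternative decomposition).

-- the urgent-phrase list, shared verbatim by both programs
def pvPhrases : List String := [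
  "act now", "limited time", "important", "hurry", "quickly", "soon",
  "serious legal action", "respond within 24 hours", "immediate action required",
  "urgent", "failure to respond", "important notice", "last warning"
]

-- ===== PORT A =====
-- `any(phrase in text.lower() for phrase in urgent_phrases)`: phrase-major substring test
def contains_urgent_language (email_body : String) (subject : String) : Bool :=
  let body_contains_urgent :=
    pvPhrases.any (fun phrase => PySem.Str.isIn phrase (PySem.Str.lower email_body))
  -- `subject` is a String under the type convention, so the `isinstance(subject, list)` branch is dead
  let subject_contains_urgent :=
    pvPhrases.any (fun phrase => PySem.Str.isIn phrase (PySem.Str.lower subject))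
  body_contains_urgent || subject_contains_urgent

-- ===== PORT B =====
-- `any(t.startswith(urgent_phrases, i) for i in range(len(t)+1))`: position-major scan
def pvHasUrgent (text : String) : Bool :=
  let t := PySem.Chars.lower text.toList
  (List.range (t.length + 1)).any (fun i =>
    pvPhrases.any (fun p => PySem.Chars.startswith (t.drop i) p.toList))

def contains_urgent_language_alt (email_body : String) (subject : String) : Bool :=
  let body_hit := pvHasUrgent email_body
  body_hit || pvHasUrgent subject

-- ===== PRECONDITION & SPEC =====
def Spec_contains_urgent_language (email_body : String) (subject : String) (out : Bool) : Prop := out = contains_urgent_language_alt email_body subject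
instance (email_body : String) (subject : String) (out : Bool) : Decidable (Spec_contains_urgent_language email_body subject out) := by unfold Spec_contains_urgent_language; infer_instance

-- ===== CLAIM (what is proved, stated in full; the proofs are below) =====
def Claim_equal_contains_urgent_language : Prop := ∀ (email_body : String) (subject : String), Dom_contains_urgent_language email_body subject → Spec_contains_urgent_language email_body subject (contains_urgent_language email_body subject)

-- ===== LEMMAS AND PROOFS =====

-- the position-major scan of B finds a phrase iff A's phrase-major substring test does
lemma pvHasUrgent_eq (text : String) :
    pvHasUrgent text
      = pvPhrases.any (fun phrase => PySem.Str.isIn phrase (PySem.Str.lower text)) := by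
  unfold pvHasUrgent
  rw [Bool.eq_iff_iff]
  simp only [List.any_eq_true, List.mem_range, PySem.Str.isIn_eq, PySem.Str.toList_lower,
    PySem.Chars.startswith_iff]
  constructor
  · rintro ⟨i, _, p, hp, hpre⟩
    exact ⟨p, hp,
      (PySem.Chars.exists_prefix_drop_iff_isIn _ _).mp ⟨i, hpre⟩⟩
  · rintro ⟨p, hp, hin⟩
    obtain ⟨j, hj⟩ := (PySem.Chars.exists_prefix_drop_iff_isIn _ _).mpr hin
    set t := PySem.Chars.lower text.toList with ht
    by_cases hle : j ≤ t.length
    · exact ⟨j, by omega, p, hp, hj⟩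
    · refine ⟨t.length, by omega, p, hp, ?_⟩
      have h1 : t.drop j = [] := List.drop_eq_nil_of_le (by omega)
      have h2 : t.drop t.length = [] := List.drop_eq_nil_of_le le_rfl
      rw [h2]; rw [h1] at hj; exact hj

-- ===== VERDICT (by name: the statement is the Claim_ definition above) =====
theorem contains_urgent_language_spec : Claim_equal_contains_urgent_language := by
  intro email_body subject _
  unfold Spec_contains_urgent_language contains_urgent_language contains_urgent_language_alt
  rw [pvHasUrgent_eq, pvHasUrgent_eq]
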